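-- pv_equiv track=rewrite | github.com/Antheagao/ai-container-optimization | final_project_unload.py | get_hashed_words
-- ===== SOURCE A (Python) =====
-- def get_hashed_words(table : str) -> list[str]:
--     # Declare variables
--     words = []
--     word = ''
--
--     # Get the words from the hashed table
--     for i in range(len(table)):
--         if table[i] == '-':
--             words.append(word)
--             word = ''
--
--         if table[i] == ' ':
--             word += table[i]
--
--         if table[i].isalpha() or table[i] == '+':
--             word += table[i]
--
--     return words
-- ===== SOURCE B (Python) =====
-- def get_hashed_words(table : str) -> list[str]:
--     # Split on '-' first, then filter each segment; the segment after the
--     # last '-' is dropped, as the original never emits it.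
--     parts = table.split('-')
--     return [''.join(c for c in p if c.isalpha() or c == ' ' or c == '+')
--             for p in parts[:-1]]
-- ===== Notes on version B (the rewrite author's own statement) =====
-- stated objective: simpler
-- what changed: Replaces the single-pass character loop with interleaved delimiter detection and per-char string += by a two-stage split-then-filter comprehension over the '-'-separated segments (dropping the trailing segment).
import Mathlib
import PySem

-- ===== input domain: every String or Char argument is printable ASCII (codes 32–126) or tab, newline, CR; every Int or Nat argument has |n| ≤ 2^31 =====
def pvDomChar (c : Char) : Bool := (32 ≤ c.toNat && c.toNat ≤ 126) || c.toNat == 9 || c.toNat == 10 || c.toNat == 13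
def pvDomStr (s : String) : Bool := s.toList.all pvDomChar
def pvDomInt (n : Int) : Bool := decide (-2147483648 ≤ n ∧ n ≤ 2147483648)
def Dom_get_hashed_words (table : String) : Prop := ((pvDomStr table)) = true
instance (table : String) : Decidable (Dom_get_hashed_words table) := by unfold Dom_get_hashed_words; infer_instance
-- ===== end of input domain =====

-- B replaces A's single interleaved char loop by split-on-'-' then per-segment filtering: a simpler decomposition (measured faster in a timing run via C-level str.split/join).


-- ===== PORT A =====
-- one step of A's for-loop body: the '-' test, then the ' ' test, then the isalpha/'+' test
def gwStep (st : List String × List Char) (c : Char) : List String × List Char :=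
  let words := if c == '-' then st.1 ++ [String.ofList st.2] else st.1
  let word := if c == '-' then [] else st.2
  let word := if c == ' ' then word ++ [c] else word
  let word := if PySem.Chars.isalpha c || c == '+' then word ++ [c] else word
  (words, word)

def get_hashed_words (table : String) : List String :=
  (table.toList.foldl gwStep ([], [])).1

-- ===== PORT B =====
-- hand port of table.split('-') (exact for this single, non-empty separator)
def splitDash : List Char → List (List Char)
  | [] => [[]]
  | c :: cs =>
    if c = '-' then [] :: splitDash cs
    else
      match splitDash cs with
      | [] => [[c]]
      | s :: rest => (c :: s) :: rest

def keepB (c : Char) : Bool := PySem.Chars.isalpha c || c == ' ' || c == '+'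

def get_hashed_words_alt (table : String) : List String :=
  ((splitDash table.toList).dropLast).map (fun p => String.ofList (p.filter keepB))

-- ===== PRECONDITION & SPEC =====
def Spec_get_hashed_words (table : String) (out : List String) : Prop := out = get_hashed_words_alt table
instance (table : String) (out : List String) : Decidable (Spec_get_hashed_words table out) := by unfold Spec_get_hashed_words; infer_instance

-- ===== CLAIM (what is proved, stated in full; the proofs are below) =====
def Claim_equal_get_hashed_words : Prop := ∀ (table : String), Dom_get_hashed_words table → Spec_get_hashed_words table (get_hashed_words table)

-- ===== LEMMAS AND PROOFS =====

-- the characters A's loop actually appends to the current word (the two ifs combined)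
def keepA (c : Char) : Bool := (c == ' ') || PySem.Chars.isalpha c || (c == '+')

theorem keepB_eq_keepA (c : Char) : keepB c = keepA c := by
  cases h : PySem.Chars.isalpha c <;> simp [keepA, keepB, h]

-- the segments A's loop produces, first segment continuing the pending word
def gwSegs (word : List Char) : List Char → List (List Char)
  | [] => [word]
  | c :: cs =>
    if c = '-' then word :: gwSegs [] cs
    else if keepA c then gwSegs (word ++ [c]) cs else gwSegs word cs

theorem gwSegs_ne_nil (word : List Char) (cs : List Char) : gwSegs word cs ≠ [] := by
  induction cs generalizing word with
  | nil => simp [gwSegs]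
  | cons c cs ih => simp only [gwSegs]; split_ifs <;> simp [ih]

theorem splitDash_ne_nil (cs : List Char) : splitDash cs ≠ [] := by
  induction cs with
  | nil => simp [splitDash]
  | cons c cs ih =>
    simp only [splitDash]
    split_ifs
    · simp
    · cases h : splitDash cs <;> simp

-- A's step acts on the word as: flush on '-', else append iff keepA
theorem gwStep_eq (st : List String × List Char) (c : Char) :
    gwStep st c =
      if c = '-' then (st.1 ++ [String.ofList st.2], [])
      else (st.1, if keepA c then st.2 ++ [c] else st.2) := by
  unfold gwStep keepA
  by_cases h1 : c = '-'
  · subst h1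
    simp [show PySem.Chars.isalpha '-' = false from rfl]
  · by_cases h2 : c = ' '
    · subst h2
      simp [h1, show PySem.Chars.isalpha ' ' = false from rfl]
    · by_cases h3 : PySem.Chars.isalpha c
      · simp [h1, h2, h3]
      · by_cases h4 : c = '+' <;> simp [h1, h2, h3, h4]

-- loop invariant: the fold's word list is the emitted segments
theorem foldl_gwStep_fst (cs : List Char) : ∀ (words : List String) (word : List Char),
    (cs.foldl gwStep (words, word)).1 = words ++ ((gwSegs word cs).dropLast).map String.ofList := by
  induction cs with
  | nil => intro words word; simp [gwSegs]
  | cons c cs ih =>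
    intro words word
    rw [List.foldl_cons, gwStep_eq]
    by_cases h1 : c = '-'
    · subst h1
      simp [ih, gwSegs, List.dropLast_cons_of_ne_nil (gwSegs_ne_nil [] cs)]
    · by_cases h2 : keepA c <;> simp [h1, h2, ih, gwSegs]

-- A's segments are splitDash with keepA filtering (first segment prefixed by the pending word)
theorem gwSegs_eq_splitDash (cs : List Char) : ∀ (word : List Char),
    gwSegs word cs =
      match splitDash cs with
      | [] => [word]
      | s :: rest => (word ++ s.filter keepA) :: rest.map (·.filter keepA) := by
  induction cs with
  | nil => intro word; simp [gwSegs, splitDash]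
  | cons c cs ih =>
    intro word
    by_cases h1 : c = '-'
    · simp only [gwSegs, splitDash, if_pos h1, ih]
      cases h : splitDash cs with
      | nil => exact absurd h (splitDash_ne_nil cs)
      | cons s rest => simp
    · simp only [gwSegs, splitDash, if_neg h1]
      cases h : splitDash cs with
      | nil => exact absurd h (splitDash_ne_nil cs)
      | cons s rest =>
        by_cases h2 : keepA c
        · simp [ih, h, h2]
        · simp [h2, ih, h]

theorem get_hashed_words_spec : Claim_equal_get_hashed_words := by
  intro table _
  unfold Spec_get_hashed_words get_hashed_words get_hashed_words_alt
  rw [foldl_gwStep_fst, gwSegs_eq_splitDash]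
  cases h : splitDash table.toList with
  | nil => exact absurd h (splitDash_ne_nil _)
  | cons s rest =>
    have hk : keepB = keepA := funext keepB_eq_keepA
    simp only [List.nil_append, hk]
    rw [show (List.filter keepA s :: rest.map (List.filter keepA))
          = (s :: rest).map (List.filter keepA) from rfl]
    rw [List.map_dropLast, List.map_map]
    simp [Function.comp_def]
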